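-- pv_equiv track=rewrite | github.com/pypi-data/pypi-mirror-268 | packages/rapidpe-rift-rota-tools/rapidpe_rift_rota_tools-0.0.3-py3-none-any.whl/rapidpe_rift_rota_tools/condor.py | get_latest_status
-- ===== SOURCE A (Python) =====
-- status_dict = {
--     "000": "Job submitted",
--     "001": "Job executing",
--     "005": "Job terminated",
--     "009": "Job aborted",
--     "010": "Job was suspended",
--     "012": "Job was held",
--     "013": "Job was released",
-- }
--
-- def get_latest_status(condor_status_id, condor_line_id):
--     status_found = False
--     status_keys = status_dict.keys()
--     latest_status = None
--     status_line = None
--     i = len(condor_status_id) - 1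
--     while status_found is False and i >= 0:
--         if condor_status_id[i] in status_keys:
--             status_found = True
--             latest_status = condor_status_id[i]
--             status_line = condor_line_id[i]
--         if status_found:
--             break
--         else:
--             i -= 1
--     return latest_status, status_line
-- ===== SOURCE B (Python) =====
-- status_dict = {
--     "000": "Job submitted",
--     "001": "Job executing",
--     "005": "Job terminated",
--     "009": "Job aborted",
--     "010": "Job was suspended",
--     "012": "Job was held",
--     "013": "Job was released",
-- }
--
-- def get_latest_status(condor_status_id, condor_line_id):
--     latest_status = None
--     status_line = None
--     for i in range(len(condor_status_id)):
--         if condor_status_id[i] in status_dict: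
--             latest_status = condor_status_id[i]
--             status_line = condor_line_id[i]
--     return latest_status, status_line
-- ===== Notes on version B (the rewrite author's own statement) =====
-- stated objective: simpler
-- what changed: Replaces the backward while-loop with flag/break early-exit by a plain forward for-loop that overwrites two accumulators on every match, so the last match survives.
import Mathlib
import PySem

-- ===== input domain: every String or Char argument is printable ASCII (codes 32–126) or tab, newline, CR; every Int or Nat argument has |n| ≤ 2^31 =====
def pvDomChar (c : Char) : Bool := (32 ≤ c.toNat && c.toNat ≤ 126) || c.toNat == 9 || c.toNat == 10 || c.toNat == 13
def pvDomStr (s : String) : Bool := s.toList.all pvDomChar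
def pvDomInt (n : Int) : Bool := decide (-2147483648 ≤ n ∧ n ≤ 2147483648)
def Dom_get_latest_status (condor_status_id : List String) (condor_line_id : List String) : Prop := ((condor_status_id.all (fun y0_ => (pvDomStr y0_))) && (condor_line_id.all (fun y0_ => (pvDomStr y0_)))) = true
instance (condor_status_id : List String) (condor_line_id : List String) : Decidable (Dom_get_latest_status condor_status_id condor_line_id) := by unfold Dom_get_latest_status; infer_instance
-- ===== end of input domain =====

-- B is a simpler forward for-loop overwriting two accumulators on every match (no flag, no break),
-- instead of A's backward while-loop with status_found/break; return values proved equal on Pre_.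

-- the keys of status_dict, in insertion order
def pvStatusKeys : List String := ["000", "001", "005", "009", "010", "012", "013"]

-- ===== PORT A =====
-- A's backward while-loop: fuel k means current index i = k - 1; loop ends when i < 0 (k = 0).
-- indices into condor_status_id are always in range here, so getD is exact; the
-- condor_line_id[i] access can raise in Python — those inputs are excluded by Pre_.
def pvALoop (s l : List String) : Nat → Option String × Option String
  | 0 => (none, none)
  | k + 1 =>
      if pvStatusKeys.contains (s.getD k "") then
        (some (s.getD k ""), some (l.getD k ""))
      else
        pvALoop s l k

def get_latest_status (condor_status_id : List String) (condor_line_id : List String) : Option String × Option String :=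
  pvALoop condor_status_id condor_line_id condor_status_id.length

-- ===== PORT B =====
-- forward for-loop over range(len(condor_status_id)) overwriting the accumulator pair on each match
def get_latest_status_alt (condor_status_id : List String) (condor_line_id : List String) : Option String × Option String :=
  (List.range condor_status_id.length).foldl
    (fun acc i =>
      if pvStatusKeys.contains (condor_status_id.getD i "") then
        (some (condor_status_id.getD i ""), some (condor_line_id.getD i ""))
      else acc)
    (none, none)

-- ===== PRECONDITION & SPEC =====
-- Pre_ excludes exactly the inputs where Python A raises IndexError: a matching status id at an
-- index beyond the end of condor_line_id (the last match has the largest such index, so this is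
-- precisely A's raising condition).
def Pre_get_latest_status (condor_status_id : List String) (condor_line_id : List String) : Prop :=
  ∀ i : Nat, i < condor_status_id.length →
    pvStatusKeys.contains (condor_status_id.getD i "") = true →
    i < condor_line_id.length

instance (condor_status_id : List String) (condor_line_id : List String) : Decidable (Pre_get_latest_status condor_status_id condor_line_id) := by unfold Pre_get_latest_status; infer_instance

def pvWitness_get_latest_status : List String × List String := (["000", "xyz", "005"], ["a", "b", "c"])

def Spec_get_latest_status (condor_status_id : List String) (condor_line_id : List String) (out : Option String × Option String) : Prop := out = get_latest_status_alt condor_status_id condor_line_id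
instance (condor_status_id : List String) (condor_line_id : List String) (out : Option String × Option String) : Decidable (Spec_get_latest_status condor_status_id condor_line_id out) := by unfold Spec_get_latest_status; infer_instance

-- ===== CLAIM (what is proved, stated in full; the proofs are below) =====
def Claim_equal_get_latest_status : Prop := ∀ (condor_status_id : List String) (condor_line_id : List String), Dom_get_latest_status condor_status_id condor_line_id → Pre_get_latest_status condor_status_id condor_line_id → Spec_get_latest_status condor_status_id condor_line_id (get_latest_status condor_status_id condor_line_id)

-- ===== LEMMAS AND PROOFS =====

-- Backward first-match over indices < k equals forward fold over range k: both satisfy the same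
-- recurrence  step (k+1) = if match k then hit k else step k.
theorem pvALoop_eq_foldl (s l : List String) (k : Nat) :
    pvALoop s l k =
      (List.range k).foldl
        (fun acc i =>
          if pvStatusKeys.contains (s.getD i "") then
            (some (s.getD i ""), some (l.getD i ""))
          else acc)
        (none, none) := by
  induction k with
  | zero => rfl
  | succ n ih =>
      rw [List.range_succ, List.foldl_append, ← ih]
      simp only [pvALoop, List.foldl]

-- ===== VERDICT (by name: the statement is the Claim_ definition above) =====
theorem get_latest_status_spec : Claim_equal_get_latest_status := by
  intro s l _ _
  unfold Spec_get_latest_status get_latest_status get_latest_status_alt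
  exact pvALoop_eq_foldl s l s.length
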